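-- pv_equiv track=rewrite | github.com/yunior123/hackerrank | problem_solving.py | maxSubarrayValue1
-- ===== SOURCE A (Python) =====
-- def maxSubarrayValue1(arr):
--     # Write your code here
--     max_value = 0
--     for i in range(len(arr)):
--         even_sum = 0
--         odd_sum = 0
--         for j in range(i, len(arr)):
--             if j % 2 == 0:
--                 even_sum += arr[j]
--             else:
--                 odd_sum += arr[j]
--             value = (even_sum - odd_sum) ** 2
--             if value > max_value:
--                 max_value = value
--     return max_value
-- ===== SOURCE B (Python) =====
-- def maxSubarrayValue1(arr):
--     # O(n): signed prefix sums; answer = (max prefix - min prefix) ** 2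
--     p = 0
--     mn = 0
--     mx = 0
--     sign = 1
--     for x in arr:
--         p += sign * x
--         sign = -sign
--         if p < mn:
--             mn = p
--         if p > mx:
--             mx = p
--     return (mx - mn) ** 2
-- ===== Notes on version B (the rewrite author's own statement) =====
-- stated objective: faster
-- what changed: Replaced A's O(n^2) double loop over all subarrays by a single pass over signed prefix sums, returning (max prefix - min prefix)^2.
import Mathlib
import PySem

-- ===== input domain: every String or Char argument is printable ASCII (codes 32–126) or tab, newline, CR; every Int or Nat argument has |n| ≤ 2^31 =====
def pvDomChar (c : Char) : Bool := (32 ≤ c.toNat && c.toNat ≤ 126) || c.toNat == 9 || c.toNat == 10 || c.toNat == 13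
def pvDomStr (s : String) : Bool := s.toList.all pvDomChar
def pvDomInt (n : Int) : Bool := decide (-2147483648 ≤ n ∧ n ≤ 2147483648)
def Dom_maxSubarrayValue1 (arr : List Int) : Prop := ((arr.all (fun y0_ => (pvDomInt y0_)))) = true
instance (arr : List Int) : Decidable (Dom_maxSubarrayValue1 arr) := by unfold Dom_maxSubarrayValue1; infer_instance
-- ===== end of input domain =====

-- B replaces A's O(n^2) double loop by one O(n) pass over signed prefix sums: answer = (max prefix - min prefix)^2.

-- ===== PORT A =====
-- body of A's inner loop (state = (even_sum, odd_sum, max_value))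
def stepAI (arr : List Int) (st : Int × Int × Int) (j : Int) : Int × Int × Int :=
  let even_sum := if PySem.Int.mod j 2 = 0 then st.1 + PySem.List.pyGetD arr j 0 else st.1
  let odd_sum := if PySem.Int.mod j 2 = 0 then st.2.1 else st.2.1 + PySem.List.pyGetD arr j 0
  let value := (even_sum - odd_sum) ^ 2
  (even_sum, odd_sum, if value > st.2.2 then value else st.2.2)

def maxSubarrayValue1 (arr : List Int) : Int :=
  (PySem.List.pyRange 0 arr.length 1).foldl (fun max_value i =>
    ((PySem.List.pyRange i arr.length 1).foldl (stepAI arr) (0, 0, max_value)).2.2) 0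

-- ===== PORT B =====
def maxSubarrayValue1_alt (arr : List Int) : Int :=
  let st := arr.foldl
    (fun (st : Int × Int × Int × Int) x =>
      let p := st.1 + st.2.2.2 * x
      let sign := -st.2.2.2
      let mn := if p < st.2.1 then p else st.2.1
      let mx := if p > st.2.2.1 then p else st.2.2.1
      (p, mn, mx, sign))
    (0, 0, 0, 1)
  (st.2.2.1 - st.2.1) ^ 2

-- ===== PRECONDITION & SPEC =====
def Spec_maxSubarrayValue1 (arr : List Int) (out : Int) : Prop := out = maxSubarrayValue1_alt arr
instance (arr : List Int) (out : Int) : Decidable (Spec_maxSubarrayValue1 arr out) := by unfold Spec_maxSubarrayValue1; infer_instance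

-- ===== CLAIM (what is proved, stated in full; the proofs are below) =====
def Claim_equal_maxSubarrayValue1 : Prop := ∀ (arr : List Int), Dom_maxSubarrayValue1 arr → Spec_maxSubarrayValue1 arr (maxSubarrayValue1 arr)

-- ===== LEMMAS AND PROOFS =====

-- sign of index k in A's even/odd bookkeeping
def sgP (k : Nat) : Int := if k % 2 = 0 then 1 else -1

-- signed prefix sum P k = sum_{t<k} sgP t * arr[t]
def Pf (arr : List Int) : Nat → Int
  | 0 => 0
  | k + 1 => Pf arr k + sgP k * arr.getD k 0

lemma sgP_succ (k : Nat) : sgP (k + 1) = -sgP k := by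
  rcases Nat.mod_two_eq_zero_or_one k with h | h <;> simp [sgP, Nat.add_mod, h]

-- A's inner-loop step, on Nat indices
def stepA (arr : List Int) (st : Int × Int × Int) (j : Nat) : Int × Int × Int :=
  let even_sum := if j % 2 = 0 then st.1 + arr.getD j 0 else st.1
  let odd_sum := if j % 2 = 0 then st.2.1 else st.2.1 + arr.getD j 0
  let value := (even_sum - odd_sum) ^ 2
  (even_sum, odd_sum, if value > st.2.2 then value else st.2.2)

lemma ite_gt_eq_max (a b : Int) : (if b > a then b else a) = max a b := by
  rw [max_def]; split_ifs <;> omega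

lemma ite_lt_eq_min (a b : Int) : (if b < a then b else a) = min a b := by
  rw [min_def]; split_ifs <;> omega

lemma stepAI_cast (arr : List Int) (st : Int × Int × Int) (k : Nat) :
    stepAI arr st (k : Int) = stepA arr st k := by
  have hd : ((2 : Int) ∣ (k : Int)) ↔ k % 2 = 0 := by omega
  rcases Nat.mod_two_eq_zero_or_one k with h | h <;> simp [stepAI, stepA, hd, h]

-- the inner loop computes a running max of (P(j+1) - P a)^2 (offset by es - os)
lemma innerA (arr : List Int) : ∀ (m a : Nat) (es os mv : Int),
    (List.foldl (stepA arr) (es, os, mv) (List.range' a m)).2.2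
      = List.foldl max mv ((List.range' a m).map
          (fun j => (es - os + (Pf arr (j + 1) - Pf arr a)) ^ 2)) := by
  intro m
  induction m with
  | zero => intro a es os mv; simp
  | succ m ih =>
    intro a es os mv
    rw [List.range'_succ]
    simp only [List.foldl_cons, List.map_cons]
    have hstep : stepA arr (es, os, mv) a
        = (if a % 2 = 0 then es + arr.getD a 0 else es,
           if a % 2 = 0 then os else os + arr.getD a 0,
           max mv ((es - os + (Pf arr (a + 1) - Pf arr a)) ^ 2)) := by
      rcases Nat.mod_two_eq_zero_or_one a with h | h <;>
        simp [stepA, h, ite_gt_eq_max, Pf, sgP] <;> ring_nf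
    rw [hstep, ih]
    have hdiff : (if a % 2 = 0 then es + arr.getD a 0 else es)
        - (if a % 2 = 0 then os else os + arr.getD a 0)
        = es - os + (Pf arr (a + 1) - Pf arr a) := by
      rcases Nat.mod_two_eq_zero_or_one a with h | h <;> simp [h, Pf, sgP] <;> ring
    congr 1
    apply List.map_congr_left
    intro j _
    rw [hdiff]
    ring_nf

-- flattening a fold of max-folds
lemma foldl_maxflat (C : Nat → List Int) : ∀ (l : List Nat) (init : Int),
    List.foldl (fun mv a => List.foldl max mv (C a)) init l
      = List.foldl max init (l.flatMap C) := by
  intro l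
  induction l with
  | nil => intro init; simp
  | cons a l ih => intro init; simp [List.foldl_append, ih]

-- candidates of A's double loop
def candsC (arr : List Int) (a : Nat) : List Int :=
  (List.range' a (arr.length - a)).map (fun j => (Pf arr (j + 1) - Pf arr a) ^ 2)

-- A computes the max of all candidates (and 0)
lemma A_char (arr : List Int) :
    maxSubarrayValue1 arr
      = List.foldl max 0 ((List.range' 0 arr.length).flatMap (candsC arr)) := by
  have hinnerFull : ∀ (a : Nat) (mv : Int),
      ((PySem.List.pyRange (a : Int) arr.length 1).foldl (stepAI arr) (0, 0, mv)).2.2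
        = List.foldl max mv (candsC arr a) := by
    intro a mv
    have hinner : PySem.List.pyRange (a : Int) arr.length 1
        = (List.range' a (arr.length - a)).map (fun k : Nat => (k : Int)) := by
      rw [PySem.List.pyRange_one]
      have h1 : ((arr.length : Int) - (a : Int)).toNat = arr.length - a := by omega
      rw [h1, List.range'_eq_map_range]
      simp [Function.comp]
    rw [hinner, List.foldl_map]
    simp only [stepAI_cast]
    rw [innerA]
    unfold candsC
    congr 1
    apply List.map_congr_left
    intro j _
    ring_nf
  rw [← foldl_maxflat]
  unfold maxSubarrayValue1
  have houter : PySem.List.pyRange 0 arr.length 1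
      = (List.range' 0 arr.length).map (fun k : Nat => (k : Int)) := by
    rw [PySem.List.pyRange_one]
    have h1 : ((arr.length : Int) - 0).toNat = arr.length := by omega
    rw [h1, List.range'_eq_map_range]
    simp
  rw [houter, List.foldl_map]
  simp only [hinnerFull]

-- B's running prefix values (after each element)
def prefVals : Int → Int → List Int → List Int
  | _, _, [] => []
  | s, p, x :: xs => (p + s * x) :: prefVals (-s) (p + s * x) xs

def endPv : Int → Int → List Int → Int
  | _, p, [] => p
  | s, p, x :: xs => endPv (-s) (p + s * x) xs

def endSv : Int → List Int → Int
  | s, [] => s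
  | s, _ :: xs => endSv (-s) xs

-- B's fold, characterized
lemma B_fold : ∀ (l : List Int) (p mn mx s : Int),
    List.foldl
      (fun (st : Int × Int × Int × Int) x =>
        let p := st.1 + st.2.2.2 * x
        let sign := -st.2.2.2
        let mn := if p < st.2.1 then p else st.2.1
        let mx := if p > st.2.2.1 then p else st.2.2.1
        (p, mn, mx, sign))
      (p, mn, mx, s) l
    = (endPv s p l, List.foldl min mn (prefVals s p l),
       List.foldl max mx (prefVals s p l), endSv s l) := by
  intro l
  induction l with
  | nil => intro p mn mx s; simp [prefVals, endPv, endSv]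
  | cons x xs ih =>
    intro p mn mx s
    simp only [List.foldl_cons, prefVals, endPv, endSv]
    rw [ih]
    simp [ite_lt_eq_min, ite_gt_eq_max]

lemma B_char (arr : List Int) :
    maxSubarrayValue1_alt arr
      = (List.foldl max 0 (prefVals 1 0 arr) - List.foldl min 0 (prefVals 1 0 arr)) ^ 2 := by
  unfold maxSubarrayValue1_alt
  rw [B_fold]

-- prefVals are the signed prefix sums Pf at indices 1..n
lemma prefVals_eq (arr : List Int) : ∀ (l : List Int) (k : Nat), l = arr.drop k →
    prefVals (sgP k) (Pf arr k) l = (List.range' (k + 1) l.length).map (Pf arr) := by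
  intro l
  induction l with
  | nil => intro k _; simp [prefVals]
  | cons x xs ih =>
    intro k hk
    have hx : arr.getD k 0 = x := by
      have h0 : arr[k]? = some x := by
        have h := congrArg (fun l : List Int => l[0]?) hk
        simpa [List.getElem?_drop] using h.symm
      simp [List.getD_eq_getElem?_getD, h0]
    have hxs : xs = arr.drop (k + 1) := by
      have h := congrArg (fun l : List Int => l.drop 1) hk
      simpa [List.drop_drop] using h
    have hP : Pf arr k + sgP k * x = Pf arr (k + 1) := by
      rw [hx.symm]; simp [Pf]
    simp only [prefVals, List.length_cons, List.range'_succ, List.map_cons]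
    rw [hP, ← sgP_succ, ih (k + 1) hxs]

-- (x - y)^2 ≤ (hi - lo)^2 when x, y ∈ [lo, hi]
lemma sq_diff_le (x y lo hi : Int) (h1 : lo ≤ x) (h2 : x ≤ hi) (h3 : lo ≤ y) (h4 : y ≤ hi) :
    (x - y) ^ 2 ≤ (hi - lo) ^ 2 := by nlinarith

-- foldl max bounded above
lemma foldl_max_le {l : List Int} {init b : Int} (h0 : init ≤ b) (h : ∀ y ∈ l, y ≤ b) :
    List.foldl max init l ≤ b := by
  induction l generalizing init with
  | nil => simpa using h0
  | cons x xs ih =>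
    simp only [List.foldl_cons]
    exact ih (max_le h0 (h x (by simp))) (fun y hy => h y (List.mem_cons_of_mem _ hy))

-- the main equality
lemma main_eq (arr : List Int) : maxSubarrayValue1 arr = maxSubarrayValue1_alt arr := by
  obtain ⟨Q, hQdef, hQ⟩ :
      ∃ Q, Q = prefVals 1 0 arr ∧ Q = (List.range' 1 arr.length).map (Pf arr) :=
    ⟨_, rfl, by simpa [sgP, Pf] using prefVals_eq arr arr 0 (by simp)⟩
  obtain ⟨M, hM⟩ : ∃ M, M = List.foldl max 0 Q := ⟨_, rfl⟩
  obtain ⟨m, hm⟩ : ∃ m, m = List.foldl min 0 Q := ⟨_, rfl⟩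
  obtain ⟨n, hn⟩ : ∃ n, n = arr.length := ⟨_, rfl⟩
  have hM0 : (0 : Int) ≤ M := hM ▸ (PySem.List.le_foldl_max Q 0).1
  have hm0 : m ≤ (0 : Int) := hm ▸ (PySem.List.foldl_min_le Q 0).1
  -- every Pf value with index ≤ n lies in [m, M]
  have hbound : ∀ k ≤ n, m ≤ Pf arr k ∧ Pf arr k ≤ M := by
    intro k hk
    rcases Nat.eq_zero_or_pos k with rfl | hkpos
    · simpa [Pf] using ⟨hm0, hM0⟩
    · have hmem : Pf arr k ∈ Q := by
        rw [hQ]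
        exact List.mem_map_of_mem (by rw [List.mem_range'_1]; omega)
      exact ⟨hm ▸ (PySem.List.foldl_min_le Q 0).2 _ hmem,
             hM ▸ (PySem.List.le_foldl_max Q 0).2 _ hmem⟩
  -- M and m are attained at some prefix index
  have hMat : ∃ k ≤ n, M = Pf arr k := by
    rcases PySem.List.foldl_max_mem Q 0 with h | h
    · exact ⟨0, Nat.zero_le _, by rw [hM, h]; simp [Pf]⟩
    · rw [hQ] at h
      rcases List.mem_map.1 h with ⟨k, hk, hPk⟩
      rw [List.mem_range'_1] at hk
      exact ⟨k, by omega, by rw [hM, hQ, ← hPk]⟩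
  have hmat : ∃ k ≤ n, m = Pf arr k := by
    rcases PySem.List.foldl_min_mem Q 0 with h | h
    · exact ⟨0, Nat.zero_le _, by rw [hm, h]; simp [Pf]⟩
    · rw [hQ] at h
      rcases List.mem_map.1 h with ⟨k, hk, hPk⟩
      rw [List.mem_range'_1] at hk
      exact ⟨k, by omega, by rw [hm, hQ, ← hPk]⟩
  rw [A_char, B_char, ← hQdef, ← hM, ← hm, ← hn]
  have hCCmem : ∀ c ∈ (List.range' 0 n).flatMap (candsC arr),
      ∃ a j, a ≤ n ∧ j + 1 ≤ n ∧ c = (Pf arr (j + 1) - Pf arr a) ^ 2 := by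
    intro c hc
    rcases List.mem_flatMap.1 hc with ⟨a, ha, hcand⟩
    rw [List.mem_range'_1] at ha
    unfold candsC at hcand
    rcases List.mem_map.1 hcand with ⟨j, hj, hcj⟩
    rw [List.mem_range'_1] at hj
    rw [← hn] at hj
    exact ⟨a, j, by omega, by omega, hcj.symm⟩
  apply le_antisymm
  · -- every candidate ≤ (M - m)^2
    apply foldl_max_le
    · positivity
    · intro c hc
      rcases hCCmem c hc with ⟨a, j, ha, hj, rfl⟩
      exact sq_diff_le _ _ _ _ (hbound _ hj).1 (hbound _ hj).2 (hbound a ha).1 (hbound a ha).2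
  · rcases hMat with ⟨k1, hk1, hMk⟩
    rcases hmat with ⟨k2, hk2, hmk⟩
    by_cases hMm : M = m
    · have h0 : (M - m) ^ 2 = 0 := by rw [hMm]; ring
      rw [h0]
      exact (PySem.List.le_foldl_max _ 0).1
    · have hk12 : k1 ≠ k2 := by
        intro h; exact hMm (by rw [hMk, hmk, h])
      have hij : min k1 k2 < max k1 k2 := by omega
      have hjn : max k1 k2 ≤ n := by omega
      have hval : (Pf arr (max k1 k2) - Pf arr (min k1 k2)) ^ 2 = (M - m) ^ 2 := by
        rcases le_total k1 k2 with h | h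
        · rw [min_eq_left h, max_eq_right h, ← hMk, ← hmk]; ring
        · rw [min_eq_right h, max_eq_left h, ← hMk, ← hmk]
      have hmem : (Pf arr (max k1 k2) - Pf arr (min k1 k2)) ^ 2
          ∈ (List.range' 0 n).flatMap (candsC arr) := by
        apply List.mem_flatMap.2
        refine ⟨min k1 k2, ?_, ?_⟩
        · rw [List.mem_range'_1]; omega
        · unfold candsC
          apply List.mem_map.2
          refine ⟨max k1 k2 - 1, ?_, ?_⟩
          · rw [List.mem_range'_1, ← hn]; constructor <;> omega
          · have h1 : max k1 k2 - 1 + 1 = max k1 k2 := by omega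
            rw [h1]
      rw [← hval]
      exact (PySem.List.le_foldl_max _ 0).2 _ hmem

-- ===== VERDICT (by name: the statement is the Claim_ definition above) =====
theorem maxSubarrayValue1_spec : Claim_equal_maxSubarrayValue1 := by
  intro arr _
  unfold Spec_maxSubarrayValue1
  exact main_eq arr
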